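-- pv_equiv track=rewrite | github.com/Waltham-Data-Science/ndi-data-browser-v2 | backend/services/tabular_query_service.py | _resolve_group_column
-- ===== SOURCE A (Python) =====
-- from typing import Any
--
-- def _alphanumeric_lower(s: str) -> str:
--     """Lowercase + strip non-alphanumerics for fuzzy substring matching.
--
--     Stream 5.1 (2026-05-15): real column keys in ontologyTableRow tables
--     use underscores and CamelCase intermixed
--     (``ElevatedPlusMaze_OpenArmNorth_Entries``), while users / the chat
--     sometimes type contiguous CamelCase (``OpenArmNorthEntries``). A
--     direct case-insensitive substring match misses these because the
--     underscore breaks contiguity. Normalizing BOTH sides to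
--     alphanumeric-only lowercase makes the comparison whitespace- and
--     punctuation-insensitive without changing the contiguity check.
--     """
--     return "".join(ch for ch in s.lower() if ch.isalnum())
--
-- def _resolve_group_column(  # noqa: PLR0911 — linear three-pass match is clearer than one collapsed branch
--     group: dict[str, Any],
--     group_by: str,
-- ) -> str | None:
--     """Resolve a possibly-imprecise group_by argument to an actual
--     column key in the matched group.
--
--     Three-pass resolution (Stream 5.1 expanded 2026-05-15):
--       1. Exact key match (literal column-key argument from the user).
--       2. Case-insensitive substring match on key, then on label
--          (preserves precision for column-name fragments).
--       3. Alphanumeric-stripped substring match on key, then label —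
--          catches the `Treatment_CNOOrSaline` ↔ `CNOorSaline` shape
--          where users mix underscore + CamelCase variants.
--
--     Returns None when nothing matches so the caller can surface an
--     explicit error with the available column list.
--     """
--     needle_lower = group_by.lower()
--     needle_alnum = _alphanumeric_lower(group_by)
--     cols = (group.get("table") or {}).get("columns") or []
--     # Pass 1: exact key match wins immediately.
--     for col in cols:
--         if str(col.get("key", "")) == group_by:
--             return group_by
--     # Pass 2: case-insensitive substring — key first (more stable
--     # than labels).
--     for col in cols:
--         if needle_lower in str(col.get("key", "")).lower():
--             return str(col["key"])
--     for col in cols: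
--         if needle_lower in str(col.get("label", "")).lower():
--             return str(col["key"])
--     # Pass 3: alphanumeric-stripped substring fallback.
--     if not needle_alnum:
--         return None
--     for col in cols:
--         if needle_alnum in _alphanumeric_lower(str(col.get("key", ""))):
--             return str(col["key"])
--     for col in cols:
--         if needle_alnum in _alphanumeric_lower(str(col.get("label", ""))):
--             return str(col["key"])
--     return None
-- ===== SOURCE B (Python) =====
-- def _alphanumeric_lower(s: str) -> str:
--     return "".join(ch for ch in s.lower() if ch.isalnum())
--
--
-- def _resolve_group_column(group, group_by):
--     """Single pass: score each column by the lowest-numbered rule it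
--     satisfies (0 exact key, 1 substring key, 2 substring label,
--     3 alnum key, 4 alnum label) and keep the first column achieving
--     the overall minimum score."""
--     needle_lower = group_by.lower()
--     needle_alnum = _alphanumeric_lower(group_by)
--     cols = (group.get("table") or {}).get("columns") or []
--     best = None  # (score, key) with lowest score, first occurrence
--     for col in cols:
--         key = str(col.get("key", ""))
--         if key == group_by:
--             score = 0
--         elif needle_lower in key.lower():
--             score = 1
--         elif needle_lower in str(col.get("label", "")).lower():
--             score = 2
--         elif needle_alnum and needle_alnum in _alphanumeric_lower(key):
--             score = 3
--         elif needle_alnum and needle_alnum in _alphanumeric_lower(str(col.get("label", ""))):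
--             score = 4
--         else:
--             continue
--         if best is None or score < best[0]:
--             best = (score, key)
--     if best is None:
--         return None
--     return group_by if best[0] == 0 else best[1]
-- ===== Notes on version B (the rewrite author's own statement) =====
-- stated objective: alternative
-- what changed: Replaced A's five sequential scans over the columns by a single pass that scores each column with the lowest-numbered matching rule (0 exact key, 1 substring key, 2 substring label, 3 alnum key, 4 alnum label) and keeps the first column achieving the overall minimum score.
import Mathlib
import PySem

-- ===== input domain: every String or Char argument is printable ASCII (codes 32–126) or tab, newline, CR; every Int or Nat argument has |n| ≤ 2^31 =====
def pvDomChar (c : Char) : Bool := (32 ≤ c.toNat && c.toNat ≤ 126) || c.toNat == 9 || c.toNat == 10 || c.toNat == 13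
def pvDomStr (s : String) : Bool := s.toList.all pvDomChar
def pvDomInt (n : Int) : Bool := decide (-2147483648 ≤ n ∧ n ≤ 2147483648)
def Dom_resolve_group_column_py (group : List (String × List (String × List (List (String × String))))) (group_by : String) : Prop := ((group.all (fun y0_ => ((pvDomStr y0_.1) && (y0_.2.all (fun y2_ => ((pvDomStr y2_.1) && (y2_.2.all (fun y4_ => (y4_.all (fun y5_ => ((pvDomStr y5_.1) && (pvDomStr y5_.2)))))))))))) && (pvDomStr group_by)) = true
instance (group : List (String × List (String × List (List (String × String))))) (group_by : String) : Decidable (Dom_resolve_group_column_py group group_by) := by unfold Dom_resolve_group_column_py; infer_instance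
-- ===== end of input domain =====

-- B replaces A's five sequential scans over the columns by ONE pass that scores each
-- column with the lowest-numbered rule it satisfies and keeps the first minimum
-- (objective: alternative decomposition; equal return value on Pre_).

-- shared helpers (both ports and Pre_ use them)
-- str(col.get(k, "")) — values are strings already, str() is identity
def pvColGet (col : List (String × String)) (k : String) : String :=
  (PySem.Dict.get? (PySem.Dict.mk col) k).getD ""

-- _alphanumeric_lower: "".join(ch for ch in s.lower() if ch.isalnum())
def pvAlnumLower (s : String) : String :=
  String.ofList ((PySem.Str.lower s).toList.filter PySem.Str.isalnum)

-- cols = (group.get("table") or {}).get("columns") or []   ('or' replaces a falsy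
-- value by an EMPTY default of the same shape, so missing-or-empty both yield [])
def pvCols (group : List (String × List (String × List (List (String × String))))) :
    List (List (String × String)) :=
  let table :=
    match PySem.Dict.get? (PySem.Dict.mk group) "table" with
    | none => []
    | some t => t
  match PySem.Dict.get? (PySem.Dict.mk table) "columns" with
  | none => []
  | some c => c

-- ===== PORT A =====
-- Five passes, each a 'for col in cols: if cond: return …' = List.find?.
-- Python's col["key"] in the label passes raises KeyError when the column has no
-- "key" entry; those inputs are excluded by Pre_ below, the port uses default "".
def resolve_group_column_py (group : List (String × List (String × List (List (String × String))))) (group_by : String) : Option String :=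
  let needle_lower := PySem.Str.lower group_by
  let needle_alnum := pvAlnumLower group_by
  let cols := pvCols group
  match cols.find? (fun col => pvColGet col "key" == group_by) with
  | some _ => some group_by
  | none =>
    match cols.find? (fun col => PySem.Str.isIn needle_lower (PySem.Str.lower (pvColGet col "key"))) with
    | some col => some (pvColGet col "key")
    | none =>
      match cols.find? (fun col => PySem.Str.isIn needle_lower (PySem.Str.lower (pvColGet col "label"))) with
      | some col => some (pvColGet col "key")
      | none =>
        if needle_alnum == "" then none
        else
          match cols.find? (fun col => PySem.Str.isIn needle_alnum (pvAlnumLower (pvColGet col "key"))) with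
          | some col => some (pvColGet col "key")
          | none =>
            match cols.find? (fun col => PySem.Str.isIn needle_alnum (pvAlnumLower (pvColGet col "label"))) with
            | some col => some (pvColGet col "key")
            | none => none

-- ===== PORT B =====
-- score of one column: lowest-numbered rule it satisfies (none if no rule)
def pvScore (needle_lower needle_alnum group_by : String) (col : List (String × String)) : Option Nat :=
  let key := pvColGet col "key"
  if key == group_by then some 0
  else if PySem.Str.isIn needle_lower (PySem.Str.lower key) then some 1
  else if PySem.Str.isIn needle_lower (PySem.Str.lower (pvColGet col "label")) then some 2
  else if needle_alnum != "" && PySem.Str.isIn needle_alnum (pvAlnumLower key) then some 3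
  else if needle_alnum != "" && PySem.Str.isIn needle_alnum (pvAlnumLower (pvColGet col "label")) then some 4
  else none

-- loop body: keep the best (lowest score, first occurrence) seen so far
def pvStep (needle_lower needle_alnum group_by : String)
    (best : Option (Nat × String)) (col : List (String × String)) : Option (Nat × String) :=
  match pvScore needle_lower needle_alnum group_by col with
  | none => best
  | some s =>
    match best with
    | none => some (s, pvColGet col "key")
    | some (bs, bk) => if s < bs then some (s, pvColGet col "key") else some (bs, bk)

def resolve_group_column_py_alt (group : List (String × List (String × List (List (String × String))))) (group_by : String) : Option String :=
  let needle_lower := PySem.Str.lower group_by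
  let needle_alnum := pvAlnumLower group_by
  let cols := pvCols group
  match cols.foldl (pvStep needle_lower needle_alnum group_by) none with
  | none => none
  | some (0, _) => some group_by
  | some (_ + 1, k) => some k

-- ===== PRECONDITION & SPEC =====
-- Pre_ excludes inputs containing a column dict WITHOUT a "key" entry whose label
-- matches the needle (case-insensitive or alphanumeric-stripped substring): on such
-- a column Python A's label passes raise KeyError at col["key"], and whether that
-- column is reached depends only on earlier columns, so the whole shape is excluded.
def Pre_resolve_group_column_py (group : List (String × List (String × List (List (String × String))))) (group_by : String) : Prop :=
  ∀ col ∈ pvCols group,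
    PySem.Dict.contains (PySem.Dict.mk col) "key" = true ∨
      (PySem.Str.isIn (PySem.Str.lower group_by) (PySem.Str.lower (pvColGet col "label")) = false ∧
        (pvAlnumLower group_by = "" ∨
          PySem.Str.isIn (pvAlnumLower group_by) (pvAlnumLower (pvColGet col "label")) = false))
instance (group : List (String × List (String × List (List (String × String))))) (group_by : String) : Decidable (Pre_resolve_group_column_py group group_by) := by unfold Pre_resolve_group_column_py; infer_instance

def pvWitness_resolve_group_column_py : (List (String × List (String × List (List (String × String))))) × String :=
  ([("table", [("columns", [[("key", "Treatment_CNOOrSaline")], [("key", "id"), ("label", "Subject")]])])], "CNOorSaline")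

def Spec_resolve_group_column_py (group : List (String × List (String × List (List (String × String))))) (group_by : String) (out : Option String) : Prop := out = resolve_group_column_py_alt group group_by
instance (group : List (String × List (String × List (List (String × String))))) (group_by : String) (out : Option String) : Decidable (Spec_resolve_group_column_py group group_by out) := by unfold Spec_resolve_group_column_py; infer_instance

-- ===== CLAIM (what is proved, stated in full; the proofs are below) =====
def Claim_equal_resolve_group_column_py : Prop := ∀ (group : List (String × List (String × List (List (String × String))))) (group_by : String), Dom_resolve_group_column_py group group_by → Pre_resolve_group_column_py group group_by → Spec_resolve_group_column_py group group_by (resolve_group_column_py group group_by)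

-- ===== LEMMAS AND PROOFS =====

-- recursive description of the fold's result (first column achieving the minimum score)
def pvBestR (nl na gb : String) : List (List (String × String)) → Option (Nat × String)
  | [] => none
  | c :: cs =>
    match pvScore nl na gb c with
    | none => pvBestR nl na gb cs
    | some s =>
      match pvBestR nl na gb cs with
      | none => some (s, pvColGet c "key")
      | some (bs, bk) => if bs < s then some (bs, bk) else some (s, pvColGet c "key")

def pvComb (b r : Option (Nat × String)) : Option (Nat × String) :=
  match r with
  | none => b
  | some y =>
    match b with
    | none => some y
    | some x => if y.1 < x.1 then some y else some x

theorem pvFoldl_eq_comb_bestR (nl na gb : String) (cols : List (List (String × String)))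
    (b : Option (Nat × String)) :
    cols.foldl (pvStep nl na gb) b = pvComb b (pvBestR nl na gb cols) := by
  induction cols generalizing b with
  | nil => cases b <;> rfl
  | cons c cs ih =>
    rw [List.foldl_cons, ih]
    cases hs : pvScore nl na gb c with
    | none => simp only [pvStep, pvBestR, hs]
    | some s =>
      cases hr : pvBestR nl na gb cs with
      | none =>
        cases b with
        | none => simp only [pvStep, pvBestR, hs, hr, pvComb]
        | some x =>
          obtain ⟨bs, bk⟩ := x
          simp only [pvStep, pvBestR, hs, hr, pvComb]
      | some y =>
        obtain ⟨br, kr⟩ := y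
        cases b with
        | none =>
          simp only [pvStep, pvBestR, hs, hr]
          by_cases h2 : br < s
          · rw [if_pos h2]; simp only [pvComb]; try rw [if_pos h2]
          · rw [if_neg h2]; simp only [pvComb]; try rw [if_neg h2]
        | some x =>
          obtain ⟨bs, bk⟩ := x
          simp only [pvStep, pvBestR, hs, hr]
          by_cases h1 : s < bs
          · rw [if_pos h1]
            by_cases h2 : br < s
            · rw [if_pos h2]; simp only [pvComb]
              rw [if_pos h2, if_pos (show br < bs by omega)]
            · rw [if_neg h2]; simp only [pvComb]
              rw [if_neg h2, if_pos h1]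
          · rw [if_neg h1]
            by_cases h2 : br < s
            · rw [if_pos h2]; try simp only [pvComb]
            · rw [if_neg h2]; simp only [pvComb]
              rw [if_neg h1, if_neg (show ¬ br < bs by omega)]

theorem pvBestR_none (nl na gb : String) (cols : List (List (String × String)))
    (h : ∀ col ∈ cols, pvScore nl na gb col = none) :
    pvBestR nl na gb cols = none := by
  induction cols with
  | nil => rfl
  | cons c cs ih =>
    simp only [pvBestR, h c (by simp)]
    exact ih (fun col hc => h col (by simp [hc]))

theorem pvBestR_mem (nl na gb : String) (cols : List (List (String × String)))
    (bs : Nat) (bk : String) (h : pvBestR nl na gb cols = some (bs, bk)) :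
    ∃ col ∈ cols, pvScore nl na gb col = some bs ∧ bk = pvColGet col "key" := by
  induction cols with
  | nil => simp [pvBestR] at h
  | cons c cs ih =>
    simp only [pvBestR] at h
    cases hs : pvScore nl na gb c with
    | none =>
      rw [hs] at h
      simp only at h
      obtain ⟨col, hc, hp⟩ := ih h
      exact ⟨col, by simp [hc], hp⟩
    | some s =>
      rw [hs] at h
      simp only at h
      cases hr : pvBestR nl na gb cs with
      | none =>
        rw [hr] at h
        simp only [Option.some.injEq, Prod.mk.injEq] at h
        exact ⟨c, by simp, by rw [hs, h.1], h.2.symm⟩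
      | some y =>
        obtain ⟨br, kr⟩ := y
        rw [hr] at h
        simp only at h
        split_ifs at h with hlt <;> simp only [Option.some.injEq, Prod.mk.injEq] at h
        · obtain ⟨col, hc, hp⟩ := ih (by rw [hr, h.1, h.2])
          exact ⟨col, by simp [hc], hp⟩
        · exact ⟨c, by simp, by rw [hs, h.1], h.2.symm⟩

theorem pvBestR_find (nl na gb : String) (cols : List (List (String × String))) (k : Nat)
    (c : List (String × String))
    (hmin : ∀ col ∈ cols, ∀ j, j < k → pvScore nl na gb col ≠ some j)
    (hf : cols.find? (fun col => pvScore nl na gb col == some k) = some c) :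
    pvBestR nl na gb cols = some (k, pvColGet c "key") := by
  induction cols with
  | nil => simp at hf
  | cons d ds ih =>
    rw [List.find?_cons] at hf
    by_cases hd : pvScore nl na gb d = some k
    · rw [show (pvScore nl na gb d == some k) = true by simp [hd]] at hf
      injection hf with hf; subst hf
      simp only [pvBestR, hd]
      cases hr : pvBestR nl na gb ds with
      | none => rfl
      | some y =>
        obtain ⟨bs, bk⟩ := y
        obtain ⟨col, hc, hsc, _⟩ := pvBestR_mem nl na gb ds bs bk hr
        have hnb : ¬ bs < k := fun hlt => hmin col (by simp [hc]) bs hlt hsc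
        simp only [hnb, if_false]
    · rw [show (pvScore nl na gb d == some k) = false by simp [hd]] at hf
      have hih := ih (fun col hc j hj => hmin col (by simp [hc]) j hj) hf
      simp only [pvBestR, hih]
      cases hs : pvScore nl na gb d with
      | none => rfl
      | some s =>
        have hks : ¬ s < k := fun hlt => hmin d (by simp) s hlt hs
        have hne : s ≠ k := fun he => hd (by rw [hs, he])
        show (if k < s then some (k, pvColGet c "key") else some (s, pvColGet d "key")) =
          some (k, pvColGet c "key")
        rw [if_pos (by omega)]

theorem pvFind?_congr {α : Type} (l : List α) (p q : α → Bool)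
    (h : ∀ x ∈ l, p x = q x) : l.find? p = l.find? q := by
  induction l with
  | nil => rfl
  | cons a l ih =>
    rw [List.find?_cons, List.find?_cons, h a (by simp)]
    split <;> [rfl; exact ih (fun x hx => h x (by simp [hx]))]

-- pvScore levels ↔ the pass conditions
theorem pvScore_eq_zero_iff (nl na gb : String) (col : List (String × String)) :
    pvScore nl na gb col = some 0 ↔ (pvColGet col "key" == gb) = true := by
  simp only [pvScore]; split_ifs <;> simp_all

theorem pvScore_eq_one_iff (nl na gb : String) (col : List (String × String))
    (h0 : ¬ (pvColGet col "key" == gb) = true) :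
    pvScore nl na gb col = some 1 ↔ PySem.Str.isIn nl (PySem.Str.lower (pvColGet col "key")) = true := by
  simp only [pvScore]; split_ifs <;> simp_all

theorem pvScore_eq_two_iff (nl na gb : String) (col : List (String × String))
    (h0 : ¬ (pvColGet col "key" == gb) = true)
    (h1 : ¬ PySem.Str.isIn nl (PySem.Str.lower (pvColGet col "key")) = true) :
    pvScore nl na gb col = some 2 ↔ PySem.Str.isIn nl (PySem.Str.lower (pvColGet col "label")) = true := by
  simp only [pvScore]; split_ifs <;> simp_all

theorem pvScore_eq_three_iff (nl na gb : String) (col : List (String × String))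
    (h0 : ¬ (pvColGet col "key" == gb) = true)
    (h1 : ¬ PySem.Str.isIn nl (PySem.Str.lower (pvColGet col "key")) = true)
    (h2 : ¬ PySem.Str.isIn nl (PySem.Str.lower (pvColGet col "label")) = true)
    (hna : (na == "") = false) :
    pvScore nl na gb col = some 3 ↔ PySem.Str.isIn na (pvAlnumLower (pvColGet col "key")) = true := by
  simp only [pvScore]; split_ifs <;> simp_all

theorem pvScore_eq_four_iff (nl na gb : String) (col : List (String × String))
    (h0 : ¬ (pvColGet col "key" == gb) = true)
    (h1 : ¬ PySem.Str.isIn nl (PySem.Str.lower (pvColGet col "key")) = true)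
    (h2 : ¬ PySem.Str.isIn nl (PySem.Str.lower (pvColGet col "label")) = true)
    (hna : (na == "") = false)
    (h3 : ¬ PySem.Str.isIn na (pvAlnumLower (pvColGet col "key")) = true) :
    pvScore nl na gb col = some 4 ↔ PySem.Str.isIn na (pvAlnumLower (pvColGet col "label")) = true := by
  simp only [pvScore]; split_ifs <;> simp_all

theorem pvScore_none (nl na gb : String) (col : List (String × String))
    (h0 : ¬ (pvColGet col "key" == gb) = true)
    (h1 : ¬ PySem.Str.isIn nl (PySem.Str.lower (pvColGet col "key")) = true)
    (h2 : ¬ PySem.Str.isIn nl (PySem.Str.lower (pvColGet col "label")) = true)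
    (h34 : (na == "") = true ∨
      (¬ PySem.Str.isIn na (pvAlnumLower (pvColGet col "key")) = true ∧
       ¬ PySem.Str.isIn na (pvAlnumLower (pvColGet col "label")) = true)) :
    pvScore nl na gb col = none := by
  simp only [pvScore]; split_ifs <;> simp_all

theorem pvComb_none (r : Option (Nat × String)) : pvComb none r = r := by
  cases r with
  | none => rfl
  | some y => obtain ⟨a, b⟩ := y; rfl

theorem pvBeqOfIff {o : Option Nat} {k : Nat} {b : Bool} (h : o = some k ↔ b = true) :
    (o == some k) = b := by
  cases b with
  | true => simp [h.mpr rfl]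
  | false =>
    simp only [beq_eq_false_iff_ne, ne_eq]
    intro hh
    exact absurd (h.mp hh) (by simp)

theorem pvMain (nl na gb : String) (cols : List (List (String × String))) :
    (match cols.find? (fun col => pvColGet col "key" == gb) with
     | some _ => some gb
     | none =>
       match cols.find? (fun col => PySem.Str.isIn nl (PySem.Str.lower (pvColGet col "key"))) with
       | some col => some (pvColGet col "key")
       | none =>
         match cols.find? (fun col => PySem.Str.isIn nl (PySem.Str.lower (pvColGet col "label"))) with
         | some col => some (pvColGet col "key")
         | none =>
           if na == "" then none
           else
             match cols.find? (fun col => PySem.Str.isIn na (pvAlnumLower (pvColGet col "key"))) with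
             | some col => some (pvColGet col "key")
             | none =>
               match cols.find? (fun col => PySem.Str.isIn na (pvAlnumLower (pvColGet col "label"))) with
               | some col => some (pvColGet col "key")
               | none => none) =
    (match cols.foldl (pvStep nl na gb) none with
     | none => none
     | some (0, _) => some gb
     | some (_ + 1, k) => some k) := by
  rw [pvFoldl_eq_comb_bestR, pvComb_none]
  rcases h0 : cols.find? (fun col => pvColGet col "key" == gb) with _ | c0
  case some =>
    -- exact match: minimum score is 0, B also answers gb
    have hf : cols.find? (fun col => pvScore nl na gb col == some 0) = some c0 := by
      rw [← h0]
      exact (pvFind?_congr cols _ _ (fun col _ =>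
        pvBeqOfIff (pvScore_eq_zero_iff nl na gb col)))
    have hb := pvBestR_find nl na gb cols 0 c0 (by omega) hf
    simp only [hb]
  case none =>
    have H0 : ∀ col ∈ cols, ¬ (pvColGet col "key" == gb) = true := by
      simpa using List.find?_eq_none.mp h0
    rcases h1 : cols.find? (fun col => PySem.Str.isIn nl (PySem.Str.lower (pvColGet col "key"))) with _ | c1
    case some =>
      have hf : cols.find? (fun col => pvScore nl na gb col == some 1) = some c1 := by
        rw [← h1]
        exact (pvFind?_congr cols _ _ (fun col hc =>
          pvBeqOfIff (pvScore_eq_one_iff nl na gb col (H0 col hc))))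
      have hmin : ∀ col ∈ cols, ∀ j, j < 1 → pvScore nl na gb col ≠ some j := by
        intro col hc j hj hs
        interval_cases j
        exact H0 col hc ((pvScore_eq_zero_iff nl na gb col).mp hs)
      have hb := pvBestR_find nl na gb cols 1 c1 hmin hf
      simp only [hb]
    case none =>
      have H1 : ∀ col ∈ cols, ¬ PySem.Str.isIn nl (PySem.Str.lower (pvColGet col "key")) = true := by
        simpa using List.find?_eq_none.mp h1
      rcases h2 : cols.find? (fun col => PySem.Str.isIn nl (PySem.Str.lower (pvColGet col "label"))) with _ | c2
      case some =>
        have hf : cols.find? (fun col => pvScore nl na gb col == some 2) = some c2 := by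
          rw [← h2]
          exact (pvFind?_congr cols _ _ (fun col hc =>
            pvBeqOfIff (pvScore_eq_two_iff nl na gb col (H0 col hc) (H1 col hc))))
        have hmin : ∀ col ∈ cols, ∀ j, j < 2 → pvScore nl na gb col ≠ some j := by
          intro col hc j hj hs
          interval_cases j
          · exact H0 col hc ((pvScore_eq_zero_iff nl na gb col).mp hs)
          · exact H1 col hc ((pvScore_eq_one_iff nl na gb col (H0 col hc)).mp hs)
        have hb := pvBestR_find nl na gb cols 2 c2 hmin hf
        simp only [hb]
      case none =>
        have H2 : ∀ col ∈ cols, ¬ PySem.Str.isIn nl (PySem.Str.lower (pvColGet col "label")) = true := by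
          simpa using List.find?_eq_none.mp h2
        cases hna : (na == "") with
        | true =>
          have hb : pvBestR nl na gb cols = none :=
            pvBestR_none nl na gb cols (fun col hc =>
              pvScore_none nl na gb col (H0 col hc) (H1 col hc) (H2 col hc) (Or.inl hna))
          simp only [hb]
          simp
        | false =>
          have hna' : (na == "") = false := hna
          rcases h3 : cols.find? (fun col => PySem.Str.isIn na (pvAlnumLower (pvColGet col "key"))) with _ | c3
          case some =>
            have hf : cols.find? (fun col => pvScore nl na gb col == some 3) = some c3 := by
              rw [← h3]
              exact (pvFind?_congr cols _ _ (fun col hc =>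
                pvBeqOfIff (pvScore_eq_three_iff nl na gb col (H0 col hc) (H1 col hc) (H2 col hc) hna')))
            have hmin : ∀ col ∈ cols, ∀ j, j < 3 → pvScore nl na gb col ≠ some j := by
              intro col hc j hj hs
              interval_cases j
              · exact H0 col hc ((pvScore_eq_zero_iff nl na gb col).mp hs)
              · exact H1 col hc ((pvScore_eq_one_iff nl na gb col (H0 col hc)).mp hs)
              · exact H2 col hc ((pvScore_eq_two_iff nl na gb col (H0 col hc) (H1 col hc)).mp hs)
            have hb := pvBestR_find nl na gb cols 3 c3 hmin hf
            simp only [hb]; rfl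
          case none =>
            have H3 : ∀ col ∈ cols, ¬ PySem.Str.isIn na (pvAlnumLower (pvColGet col "key")) = true := by
              simpa using List.find?_eq_none.mp h3
            rcases h4 : cols.find? (fun col => PySem.Str.isIn na (pvAlnumLower (pvColGet col "label"))) with _ | c4
            case some =>
              have hf : cols.find? (fun col => pvScore nl na gb col == some 4) = some c4 := by
                rw [← h4]
                exact (pvFind?_congr cols _ _ (fun col hc =>
                  pvBeqOfIff (pvScore_eq_four_iff nl na gb col (H0 col hc) (H1 col hc) (H2 col hc) hna' (H3 col hc))))
              have hmin : ∀ col ∈ cols, ∀ j, j < 4 → pvScore nl na gb col ≠ some j := by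
                intro col hc j hj hs
                interval_cases j
                · exact H0 col hc ((pvScore_eq_zero_iff nl na gb col).mp hs)
                · exact H1 col hc ((pvScore_eq_one_iff nl na gb col (H0 col hc)).mp hs)
                · exact H2 col hc ((pvScore_eq_two_iff nl na gb col (H0 col hc) (H1 col hc)).mp hs)
                · exact H3 col hc ((pvScore_eq_three_iff nl na gb col (H0 col hc) (H1 col hc) (H2 col hc) hna').mp hs)
              have hb := pvBestR_find nl na gb cols 4 c4 hmin hf
              simp only [hb]; rfl
            case none =>
              have H4 : ∀ col ∈ cols, ¬ PySem.Str.isIn na (pvAlnumLower (pvColGet col "label")) = true := by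
                simpa using List.find?_eq_none.mp h4
              have hb : pvBestR nl na gb cols = none :=
                pvBestR_none nl na gb cols (fun col hc =>
                  pvScore_none nl na gb col (H0 col hc) (H1 col hc) (H2 col hc)
                    (Or.inr ⟨H3 col hc, H4 col hc⟩))
              simp only [hb]; rfl

-- ===== VERDICT (by name: the statement is the Claim_ definition above) =====
theorem resolve_group_column_py_spec : Claim_equal_resolve_group_column_py := by
  intro group group_by _ _
  exact pvMain (PySem.Str.lower group_by) (pvAlnumLower group_by) group_by (pvCols group)
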